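-- pv_equiv track=rewrite | github.com/vasilemarina/NetworkSimulations | TwoDimensionalParityCheck/main.py | get_corrupted_parity_matrix
-- ===== SOURCE A (Python) =====
-- def get_corrupted_parity_matrix(matrix, corrupted_message):
--     corrupted_matrix = matrix.copy()
--
--     found = False
--     index = 0
--     for row in range(len(corrupted_matrix)-1):
--         for col in range(len(corrupted_matrix[0])-1):
--             if corrupted_matrix[row][col] != int(corrupted_message[index]):
--                 corrupted_matrix[row][col] = int(corrupted_message[index])
--                 found = True
--                 break
--             index += 1
--         if found:
--             break
--
--     return corrupted_matrix
-- ===== SOURCE B (Python) =====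
-- def get_corrupted_parity_matrix(matrix, corrupted_message):
--     # Purely functional, recursive rebuild: instead of shallow-copying and mutating
--     # an inner row in place inside nested index loops with a found-flag, recurse over
--     # the row list, fixing at most one row; a row fixer returns the corrected row or
--     # None when the whole row agrees with its stretch of the message.
--     cols = len(matrix[0]) - 1 if matrix else 0
--
--     def fix_row(row, c, pos):
--         """First data cell of `row` (cells 0..cols-1) disagreeing with the message
--         digits starting at `pos`: return (corrected copy of row, pos of the fix),
--         or (None, position after the matched prefix) when all of them agree."""
--         if c >= cols:
--             return None, pos
--         v = int(corrupted_message[pos])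
--         if row[c] != v:
--             fixed = list(row)
--             fixed[c] = v
--             return fixed, pos
--         return fix_row(row, c + 1, pos + 1)
--
--     def fix_rows(rows, pos):
--         if not rows:
--             return []
--         fixed, p = fix_row(rows[0], 0, pos)
--         if fixed is None:
--             return [rows[0]] + fix_rows(rows[1:], p)
--         return [fixed] + rows[1:]
--
--     return fix_rows(matrix[:-1], 0) + matrix[-1:]
-- ===== Notes on version B (the rewrite author's own statement) =====
-- stated objective: alternative
-- what changed: A's shallow copy plus in-place mutation inside nested index loops with a found-flag and a manually threaded running index is replaced by a purely functional structural recursion over the row list, with a recursive row fixer that returns either a corrected copy of the row or None when the row matches its stretch of the message.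
import Mathlib
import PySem

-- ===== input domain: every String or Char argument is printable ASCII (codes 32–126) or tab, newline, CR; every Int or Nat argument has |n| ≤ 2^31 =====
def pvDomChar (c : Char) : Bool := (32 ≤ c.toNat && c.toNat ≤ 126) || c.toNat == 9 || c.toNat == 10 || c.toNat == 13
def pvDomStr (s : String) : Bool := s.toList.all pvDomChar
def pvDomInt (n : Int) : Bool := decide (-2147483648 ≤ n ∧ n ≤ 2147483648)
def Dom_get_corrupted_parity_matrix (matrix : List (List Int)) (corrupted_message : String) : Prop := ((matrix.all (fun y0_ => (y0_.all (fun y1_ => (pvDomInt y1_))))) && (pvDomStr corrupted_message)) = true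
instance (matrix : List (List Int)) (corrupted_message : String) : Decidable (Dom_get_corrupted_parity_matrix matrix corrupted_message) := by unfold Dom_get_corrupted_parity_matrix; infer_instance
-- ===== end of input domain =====

-- B replaces A's in-place mutation inside nested index loops (found-flag, running index)
-- by a purely functional structural recursion over the row list with an Option-returning
-- row fixer (objective: alternative).  Python A mutates the shared inner row of the
-- (shallow-copied) argument; Python B mutates nothing — the equivalence proved here is
-- about the RETURN value.

-- int(corrupted_message[i]) — primitive both ports share (defaults never hit inside Pre_)
def pvMsgInt (msg : String) (i : Int) : Int :=
  ((PySem.Str.pyGet? msg i).bind (fun c => PySem.Int.ofChars? [c])).getD 0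

-- matrix[r][c] (in range inside Pre_)
def pvAt (mat : List (List Int)) (r c : Int) : Int :=
  PySem.List.pyGetD (PySem.List.pyGetD mat r []) c 0

-- ===== PORT A =====
-- inner `for col in range(...)` loop; state (corrupted_matrix, found, index)
def pvAInner (msg : String) (row : Nat) :
    List Nat → List (List Int) → Nat → List (List Int) × Bool × Nat
  | [], mat, index => (mat, false, index)
  | col :: rest, mat, index =>
    if pvAt mat row col ≠ pvMsgInt msg index then
      (mat.set row ((mat.getD row []).set col (pvMsgInt msg index)), true, index)
    else
      pvAInner msg row rest mat (index + 1)

-- outer `for row in range(...)` loop, breaking when found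
def pvAOuter (msg : String) (cols : List Nat) :
    List Nat → List (List Int) → Nat → List (List Int)
  | [], mat, _ => mat
  | row :: rest, mat, index =>
    match pvAInner msg row cols mat index with
    | (mat', found, index') => if found then mat' else pvAOuter msg cols rest mat' index'

def get_corrupted_parity_matrix (matrix : List (List Int)) (corrupted_message : String) : List (List Int) :=
  pvAOuter corrupted_message (List.range ((matrix.headD []).length - 1))
    (List.range (matrix.length - 1)) matrix 0

-- ===== PORT B =====
-- fix_row(row, c, pos): the bounded recursion c = 0,1,…,cols-1 (stopping at c >= cols)
-- is transcribed as structural recursion over the index list List.range cols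
def pvBRow (msg : String) (row : List Int) : List Nat → Nat → Option (List Int) × Nat
  | [], pos => (none, pos)
  | c :: rest, pos =>
    let v := pvMsgInt msg pos
    if PySem.List.pyGetD row (c : Int) 0 ≠ v then
      (some (PySem.List.pySetD row (c : Int) v), pos)       -- fixed = list(row); fixed[c] = v
    else pvBRow msg row rest (pos + 1)

-- fix_rows(rows, pos): structural recursion over the row list
def pvBRows (msg : String) (cols : List Nat) : List (List Int) → Nat → List (List Int)
  | [], _ => []
  | r :: rest, pos =>
    match pvBRow msg r cols pos with
    | (none, p) => r :: pvBRows msg cols rest p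
    | (some fr, _) => fr :: rest

def get_corrupted_parity_matrix_alt (matrix : List (List Int)) (corrupted_message : String) : List (List Int) :=
  -- cols = len(matrix[0]) - 1 if matrix else 0
  pvBRows corrupted_message
      (List.range (if matrix = [] then 0 else ((matrix.headD []).length : Int) - 1).toNat)
      (PySem.List.slice matrix none (some (-1))) 0
    ++ PySem.List.slice matrix (some (-1)) none

-- ===== PRECONDITION & SPEC =====
-- helpers for Pre_: number of parity columns scanned, and per-flat-cell conditions
def pvColsN (matrix : List (List Int)) : Nat := (matrix.headD []).length - 1
def pvInRange (matrix : List (List Int)) (i : Nat) : Bool :=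
  i % pvColsN matrix < (matrix.getD (i / pvColsN matrix) []).length
def pvDigitAt (msg : String) (i : Nat) : Bool :=
  i < msg.toList.length ∧ (msg.toList.getD i ' ').isDigit
def pvMatches (matrix : List (List Int)) (msg : String) (i : Nat) : Bool :=
  pvInRange matrix i && pvDigitAt msg i &&
    ((matrix.getD (i / pvColsN matrix) []).getD (i % pvColsN matrix) 0
      = ((msg.toList.getD i ' ').toNat : Int) - 48)

-- Pre_ holds exactly when Python A returns normally: the row-major scan, which stops at the
-- first cell disagreeing with its message digit, only ever reads in-range cells and digit chars.
def Pre_get_corrupted_parity_matrix (matrix : List (List Int)) (corrupted_message : String) : Prop :=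
  ∀ i < (matrix.length - 1) * pvColsN matrix,
    (∀ j < i, pvMatches matrix corrupted_message j = true) →
    (pvInRange matrix i && pvDigitAt corrupted_message i) = true
instance (matrix : List (List Int)) (corrupted_message : String) : Decidable (Pre_get_corrupted_parity_matrix matrix corrupted_message) := by unfold Pre_get_corrupted_parity_matrix; infer_instance

def pvWitness_get_corrupted_parity_matrix : List (List Int) × String := ([[0, 1], [1, 0]], "1")

def Spec_get_corrupted_parity_matrix (matrix : List (List Int)) (corrupted_message : String) (out : List (List Int)) : Prop := out = get_corrupted_parity_matrix_alt matrix corrupted_message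
instance (matrix : List (List Int)) (corrupted_message : String) (out : List (List Int)) : Decidable (Spec_get_corrupted_parity_matrix matrix corrupted_message out) := by unfold Spec_get_corrupted_parity_matrix; infer_instance

-- ===== CLAIM (what is proved, stated in full; the proofs are below) =====
def Claim_equal_get_corrupted_parity_matrix : Prop := ∀ (matrix : List (List Int)) (corrupted_message : String), Dom_get_corrupted_parity_matrix matrix corrupted_message → Pre_get_corrupted_parity_matrix matrix corrupted_message → Spec_get_corrupted_parity_matrix matrix corrupted_message (get_corrupted_parity_matrix matrix corrupted_message)

-- ===== LEMMAS AND PROOFS =====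

-- A's inner loop on row r is B's row fixer applied to row r, wrapped back into the matrix
theorem pvRowEq (msg : String) (mat : List (List Int)) (r : Nat) :
    ∀ (cs : List Nat) (idx : Nat),
    pvAInner msg r cs mat idx =
      match pvBRow msg (mat.getD r []) cs idx with
      | (none, p) => (mat, false, p)
      | (some fr, p) => (mat.set r fr, true, p) := by
  intro cs
  induction cs with
  | nil => intro idx; rfl
  | cons c rest ih =>
    intro idx
    have hA : pvAt mat (r : Int) (c : Int) = PySem.List.pyGetD (mat.getD r []) (c : Int) 0 := by
      simp [pvAt, PySem.List.pyGetD_natCast]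
    have hS : PySem.List.pySetD (mat.getD r []) (c : Int) (pvMsgInt msg (idx : Int))
        = (mat.getD r []).set c (pvMsgInt msg (idx : Int)) := by
      simp [PySem.List.pySetD_natCast]
    show (if pvAt mat (r : Int) (c : Int) ≠ pvMsgInt msg (idx : Int) then
            (mat.set r ((mat.getD r []).set c (pvMsgInt msg (idx : Int))), true, idx)
          else pvAInner msg r rest mat (idx + 1))
        = match (if PySem.List.pyGetD (mat.getD r []) (c : Int) 0 ≠ pvMsgInt msg (idx : Int) then
              (some (PySem.List.pySetD (mat.getD r []) (c : Int) (pvMsgInt msg (idx : Int))), idx)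
            else pvBRow msg (mat.getD r []) rest (idx + 1)) with
          | (none, p) => (mat, false, p)
          | (some fr, p) => (mat.set r fr, true, p)
    rw [hA, hS]
    split_ifs with h
    · rfl
    · exact ih (idx + 1)

-- A's outer loop over rows r0..r0+m-1 is B's recursion over that segment of the row list
theorem pvRowsEq (msg : String) (cs : List Nat) (mat : List (List Int)) :
    ∀ (m r0 idx : Nat), r0 + m ≤ mat.length →
    pvAOuter msg cs (List.range' r0 m) mat idx =
      mat.take r0 ++ pvBRows msg cs ((mat.drop r0).take m) idx ++ mat.drop (r0 + m) := by
  intro m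
  induction m with
  | zero =>
    intro r0 idx _
    simp [pvAOuter, pvBRows]
  | succ m ih =>
    intro r0 idx h
    have hr : r0 < mat.length := by omega
    have hdrop : mat.drop r0 = mat[r0] :: mat.drop (r0 + 1) := List.drop_eq_getElem_cons hr
    have hget : mat.getD r0 [] = mat[r0] := by
      simp [List.getD_eq_getElem?_getD, List.getElem?_eq_getElem hr]
    rw [List.range'_succ]
    show (match pvAInner msg r0 cs mat idx with
          | (mat', found, index') =>
            if found then mat' else pvAOuter msg cs (List.range' (r0 + 1) m) mat' index')
        = _
    rw [pvRowEq msg mat r0 cs idx, hdrop, List.take_succ_cons]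
    have hBrows : pvBRows msg cs (mat[r0] :: (mat.drop (r0 + 1)).take m) idx
        = match pvBRow msg mat[r0] cs idx with
          | (none, q) => mat[r0] :: pvBRows msg cs ((mat.drop (r0 + 1)).take m) q
          | (some fr, _) => fr :: (mat.drop (r0 + 1)).take m := rfl
    rw [hBrows, ← hget]
    cases hB : pvBRow msg (mat.getD r0 []) cs idx with
    | mk fr? p =>
      cases fr? with
      | none =>
        show pvAOuter msg cs (List.range' (r0 + 1) m) mat p
            = mat.take r0 ++ (mat.getD r0 [] :: pvBRows msg cs ((mat.drop (r0 + 1)).take m) p)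
                ++ mat.drop (r0 + (m + 1))
        rw [ih (r0 + 1) p (by omega)]
        have htake : mat.take (r0 + 1) = mat.take r0 ++ [mat[r0]] := by
          rw [List.take_add_one, List.getElem?_eq_getElem hr]; rfl
        rw [htake, hget, show r0 + 1 + m = r0 + (m + 1) by omega]
        simp only [List.append_assoc, List.cons_append, List.nil_append]
      | some fr =>
        show mat.set r0 fr
            = mat.take r0 ++ (fr :: (mat.drop (r0 + 1)).take m) ++ mat.drop (r0 + (m + 1))
        have hset : mat.set r0 fr = mat.take r0 ++ fr :: mat.drop (r0 + 1) := by
          rw [List.set_eq_take_append_cons_drop, if_pos hr]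
        have hsplit : (mat.drop (r0 + 1)).take m ++ mat.drop (r0 + (m + 1))
            = mat.drop (r0 + 1) := by
          have hd : mat.drop (r0 + (m + 1)) = (mat.drop (r0 + 1)).drop m := by
            rw [List.drop_drop]; congr 1; omega
          rw [hd]; exact List.take_append_drop _ _
        calc mat.set r0 fr = mat.take r0 ++ fr :: mat.drop (r0 + 1) := hset
          _ = mat.take r0 ++ fr :: ((mat.drop (r0 + 1)).take m ++ mat.drop (r0 + (m + 1))) := by
              rw [hsplit]
          _ = mat.take r0 ++ (fr :: (mat.drop (r0 + 1)).take m) ++ mat.drop (r0 + (m + 1)) := by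
              simp only [List.cons_append, List.append_assoc]

theorem pvAB (matrix : List (List Int)) (msg : String) :
    get_corrupted_parity_matrix matrix msg = get_corrupted_parity_matrix_alt matrix msg := by
  cases matrix with
  | nil => rfl
  | cons row rest =>
    have hne : (row :: rest : List (List Int)) ≠ [] := by simp
    have hcols : (if (row :: rest : List (List Int)) = [] then (0 : Int)
        else (((row :: rest).headD []).length : Int) - 1).toNat = row.length - 1 := by
      rw [if_neg hne]; simp
    unfold get_corrupted_parity_matrix get_corrupted_parity_matrix_alt
    rw [hcols, PySem.List.slice_to_neg_one, PySem.List.slice_from_neg_one]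
    rw [List.range_eq_range' (n := (row :: rest).length - 1)]
    rw [pvRowsEq msg _ (row :: rest) ((row :: rest).length - 1) 0 0 (by simp)]
    rw [List.dropLast_eq_take]
    simp

-- ===== VERDICT (by name: the statement is the Claim_ definition above) =====
theorem get_corrupted_parity_matrix_spec : Claim_equal_get_corrupted_parity_matrix := by
  intro matrix corrupted_message _ _
  unfold Spec_get_corrupted_parity_matrix
  exact pvAB matrix corrupted_message
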